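-- pv_equiv track=rewrite | github.com/c0de-pym/TicTacToe | utils.py | framing
-- ===== SOURCE A (Python) =====
-- def framing(framed_text: str) -> str:
--     # creating frame around text
--     next_line = "\n"
--     vertical_frame_left = "║ "
--     vertical_frame_right = " ║"
--
--     find_max_row = framed_text
--     rows = find_max_row.split("\n")
--     max_row = 0
--
--     for row in rows:
--         if len(row) > max_row:
--             max_row = len(row)
--
--     chart_lenght = (max_row + 2) * "="
--     line_num = 0
--     for row in rows:
--         if len(row) < len(chart_lenght):
--             rows[line_num] = row + " " * (len(chart_lenght) - len(row) - 2)
--         line_num += 1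
--     framed_text = "\n".join(rows)
--     output_frame = (
--         "╔"
--         + chart_lenght
--         + "╗"
--         + next_line
--         + vertical_frame_left
--         + framed_text.replace(
--             next_line, vertical_frame_right + next_line + vertical_frame_left
--         )
--         + vertical_frame_right
--         + next_line
--         + "╚"
--         + chart_lenght
--         + "╝"
--     )
--     return output_frame
-- ===== SOURCE B (Python) =====
-- def framing(framed_text: str) -> str:
--     # Character-level state machine: no split/join/replace; two scans over
--     # the raw characters, tracking the current line length.
--     max_row = 0
--     cur = 0
--     for ch in framed_text:
--         if ch == "\n":
--             if cur > max_row: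
--                 max_row = cur
--             cur = 0
--         else:
--             cur += 1
--     if cur > max_row:
--         max_row = cur
--     bar = "=" * (max_row + 2)
--     out = ["\u2554", bar, "\u2557\n\u2551 "]
--     cur = 0
--     for ch in framed_text:
--         if ch == "\n":
--             out.append(" " * (max_row - cur) + " \u2551\n\u2551 ")
--             cur = 0
--         else:
--             out.append(ch)
--             cur += 1
--     out.append(" " * (max_row - cur) + " \u2551\n\u255a" + bar + "\u255d")
--     return "".join(out)
-- ===== Notes on version B (the rewrite author's own statement) =====
-- stated objective: alternative
-- what changed: B never builds a list of lines: it is a character-level state machine that scans the raw string twice, first tracking the current line length to find the longest line, then re-emitting characters one by one and, at each newline (and at the end), flushing the padding and the side borders; A splits into rows, pads them in place, rejoins and inserts borders with a global .replace.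
import Mathlib
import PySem

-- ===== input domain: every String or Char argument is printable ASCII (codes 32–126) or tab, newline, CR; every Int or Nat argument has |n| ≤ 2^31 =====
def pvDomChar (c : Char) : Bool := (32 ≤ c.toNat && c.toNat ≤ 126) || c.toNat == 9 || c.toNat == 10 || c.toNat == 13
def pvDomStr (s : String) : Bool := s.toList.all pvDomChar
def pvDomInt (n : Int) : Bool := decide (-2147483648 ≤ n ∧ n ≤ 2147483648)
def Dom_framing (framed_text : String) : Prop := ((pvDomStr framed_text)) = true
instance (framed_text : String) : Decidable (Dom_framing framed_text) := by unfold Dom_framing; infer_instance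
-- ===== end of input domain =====

-- B is a character-level state machine (two raw scans, no line list, no join/replace);
-- same return value as A's split/pad/join/replace construction.

-- ===== PORT A =====
-- helper: A's second for-loop, which mutates rows[line_num] in place while iterating
def framingPadLoop (cl : Nat) (i : Nat) (rs : List (List Char)) : List (List Char) :=
  if h : i < rs.length then
    let row := rs[i]
    let rs' := if row.length < cl then rs.set i (row ++ List.replicate (cl - row.length - 2) ' ') else rs
    framingPadLoop cl (i + 1) rs'
  else rs
termination_by rs.length - i
decreasing_by
  split
  · simp only [List.length_set]; omega
  · omega

def framing (framed_text : String) : String :=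
  let rows := PySem.Chars.splitOn framed_text.toList ['\n']
  let maxRow := rows.foldl (fun m row => if row.length > m then row.length else m) 0
  let chart := List.replicate (maxRow + 2) '='
  let rows2 := framingPadLoop chart.length 0 rows
  let framed := PySem.Chars.join ['\n'] rows2
  String.ofList ("╔".toList ++ chart ++ "╗".toList ++ ['\n'] ++ "║ ".toList
    ++ PySem.Chars.replace framed ['\n'] (" ║".toList ++ ['\n'] ++ "║ ".toList)
    ++ " ║".toList ++ ['\n'] ++ "╚".toList ++ chart ++ "╝".toList)

-- ===== PORT B =====
def framing_alt (framed_text : String) : String :=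
  let cs := framed_text.toList
  -- pass 1: longest line length, char by char
  let p := cs.foldl (fun (st : Nat × Nat) ch =>
      if ch = '\n' then (if st.2 > st.1 then st.2 else st.1, 0)
      else (st.1, st.2 + 1)) (0, 0)
  let maxRow := if p.2 > p.1 then p.2 else p.1
  let bar := List.replicate (maxRow + 2) '='
  -- pass 2: emit output char by char, flushing padding + borders at each newline
  let q := cs.foldl (fun (st : List Char × Nat) ch =>
      if ch = '\n' then (st.1 ++ (List.replicate (maxRow - st.2) ' ' ++ " ║\n║ ".toList), 0)
      else (st.1 ++ [ch], st.2 + 1))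
      ("╔".toList ++ bar ++ "╗\n║ ".toList, 0)
  String.ofList (q.1 ++ (List.replicate (maxRow - q.2) ' ' ++ " ║\n╚".toList ++ bar ++ "╝".toList))

-- ===== PRECONDITION & SPEC =====
def Spec_framing (framed_text : String) (out : String) : Prop := out = framing_alt framed_text
instance (framed_text : String) (out : String) : Decidable (Spec_framing framed_text out) := by unfold Spec_framing; infer_instance

-- ===== CLAIM (what is proved, stated in full; the proofs are below) =====
def Claim_equal_framing : Prop := ∀ (framed_text : String), Dom_framing framed_text → Spec_framing framed_text (framing framed_text)

-- ===== LEMMAS AND PROOFS =====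

-- the padding A applies to one row (proof-side characterisation of the loop body)
def framingPad (cl : Nat) (r : List Char) : List Char :=
  if r.length < cl then r ++ List.replicate (cl - r.length - 2) ' ' else r

-- ---- join helpers ----
lemma join_concat (sep : List Char) (xs : List (List Char)) (a : List Char) (h : xs ≠ []) :
    PySem.Chars.join sep (xs ++ [a]) = PySem.Chars.join sep xs ++ sep ++ a := by
  induction xs with
  | nil => exact absurd rfl h
  | cons x t ih =>
    cases t with
    | nil => simp [PySem.Chars.join_cons_cons, PySem.Chars.join_singleton]
    | cons y u =>
      have ih' := ih (by simp)
      simp only [List.cons_append] at ih' ⊢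
      rw [PySem.Chars.join_cons_cons, ih', PySem.Chars.join_cons_cons]
      simp [List.append_assoc]

lemma join_snoc_snoc (sep : List Char) (xs : List (List Char)) (a : List Char) (c : Char) :
    PySem.Chars.join sep (xs ++ [a ++ [c]]) = PySem.Chars.join sep (xs ++ [a]) ++ [c] := by
  cases xs with
  | nil => simp [PySem.Chars.join_singleton]
  | cons x t =>
    rw [join_concat _ _ _ (by simp), join_concat _ _ _ (by simp)]
    simp [List.append_assoc]

-- ---- splitOn is a section of join ----
lemma go_join : ∀ (fuel : Nat) (l cur : List Char) (acc : List (List Char)),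
    l.length ≤ fuel →
    PySem.Chars.join ['\n'] (PySem.Chars.splitOn.go ['\n'] fuel l cur acc)
      = PySem.Chars.join ['\n'] (acc.reverse ++ [cur.reverse]) ++ l := by
  intro fuel
  induction fuel with
  | zero =>
    intro l cur acc hl
    have : l = [] := List.eq_nil_of_length_eq_zero (Nat.le_zero.mp hl)
    subst this
    rw [PySem.Chars.splitOn.go]
    simp
  | succ n ih =>
    intro l cur acc hl
    cases l with
    | nil => rw [PySem.Chars.splitOn.go]; simp; omega
    | cons c t =>
      rw [PySem.Chars.splitOn.go]
      simp only [List.isPrefixOf, Bool.and_true, beq_iff_eq]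
      by_cases hc : '\n' = c
      · rw [if_pos hc]
        have h1 := ih (List.drop 1 (c :: t)) [] (cur.reverse :: acc) (by simp at hl ⊢; omega)
        rw [show (['\n'] : List Char).length = 1 from rfl, h1, List.drop_one, List.tail_cons,
          List.reverse_cons, List.reverse_nil]
        rw [join_concat _ _ _ (by simp)]
        rw [← hc]
        simp
      · rw [if_neg hc]
        have := ih t (c :: cur) acc (by simp at hl ⊢; omega)
        rw [this]
        simp only [List.reverse_cons]
        rw [join_snoc_snoc]
        simp
lemma join_splitOn (s : List Char) :
    PySem.Chars.join ['\n'] (PySem.Chars.splitOn s ['\n']) = s := by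
  rw [PySem.Chars.splitOn, go_join _ _ _ _ (by omega)]
  simp [PySem.Chars.join_singleton]

-- ---- splitOn structural facts (rows are '\n'-free and nonempty) ----
lemma splitOn_go_no_nl : ∀ (fuel : Nat) (l cur : List Char) (acc : List (List Char)),
    l.length ≤ fuel → '\n' ∉ cur → (∀ p ∈ acc, '\n' ∉ p) →
    ∀ p ∈ PySem.Chars.splitOn.go ['\n'] fuel l cur acc, '\n' ∉ p := by
  intro fuel
  induction fuel with
  | zero =>
    intro l cur acc hl hcur hacc
    have : l = [] := List.eq_nil_of_length_eq_zero (Nat.le_zero.mp hl)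
    subst this
    rw [PySem.Chars.splitOn.go]
    intro p hp
    simp only [List.mem_reverse, List.mem_cons] at hp
    rcases hp with h | h
    · subst h; simpa using hcur
    · exact hacc p h
  | succ n ih =>
    intro l cur acc hl hcur hacc
    cases l with
    | nil =>
      rw [PySem.Chars.splitOn.go]
      intro p hp
      simp only [List.mem_reverse, List.mem_cons] at hp
      rcases hp with h | h
      · subst h; simpa using hcur
      · exact hacc p h
      · omega
    | cons c t =>
      rw [PySem.Chars.splitOn.go]
      simp only [List.isPrefixOf, Bool.and_true, beq_iff_eq]
      by_cases hc : '\n' = c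
      · rw [if_pos hc]
        refine ih _ [] _ (by simp at hl ⊢; omega) (by simp) ?_
        intro p hp
        rcases List.mem_cons.mp hp with h | h
        · subst h; simpa using hcur
        · exact hacc p h
      · rw [if_neg hc]
        refine ih _ _ _ (by simp at hl ⊢; omega) ?_ hacc
        intro h
        rcases List.mem_cons.mp h with h | h
        · exact hc h
        · exact hcur h

lemma splitOn_go_ne_nil : ∀ (fuel : Nat) (l cur : List Char) (acc : List (List Char)),
    PySem.Chars.splitOn.go ['\n'] fuel l cur acc ≠ [] := by
  intro fuel
  induction fuel with
  | zero => intro l cur acc; rw [PySem.Chars.splitOn.go]; simp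
  | succ n ih =>
    intro l cur acc
    cases l with
    | nil => rw [PySem.Chars.splitOn.go]; simp; omega
    | cons c t =>
      rw [PySem.Chars.splitOn.go]
      split
      · exact ih _ _ _
      · exact ih _ _ _

lemma splitOn_no_nl (s : List Char) : ∀ p ∈ PySem.Chars.splitOn s ['\n'], '\n' ∉ p := by
  rw [PySem.Chars.splitOn]
  exact splitOn_go_no_nl _ _ _ _ (by omega) (by simp) (by simp)

lemma splitOn_ne_nil (s : List Char) : PySem.Chars.splitOn s ['\n'] ≠ [] := by
  rw [PySem.Chars.splitOn]; exact splitOn_go_ne_nil _ _ _ _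

-- ---- A's padding loop ----
lemma framingPadLoop_spec (cl : Nat) (i : Nat) (rs : List (List Char)) :
    framingPadLoop cl i rs = rs.take i ++ (rs.drop i).map (framingPad cl) := by
  fun_induction framingPadLoop cl i rs with
  | case1 i rs h row rs' ih =>
    have hset : rs' = rs.set i (framingPad cl rs[i]) := by
      simp only [rs', row, framingPad]
      split
      · rfl
      · simp
    rw [ih, hset, List.set_eq_take_append_cons_drop, if_pos h]
    rw [List.drop_eq_getElem_cons h]
    have hti : (rs.take i).length = i := List.length_take_of_le (by omega)
    rw [List.take_append, List.drop_append, hti]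
    have h1 : i + 1 - i = 1 := by omega
    have h2 : List.take (i + 1) (List.take i rs) = List.take i rs := List.take_of_length_le (by omega)
    have h3 : List.drop (i + 1) (List.take i rs) = ([] : List (List Char)) :=
      List.drop_eq_nil_of_le (by omega)
    rw [h1, h2, h3]
    simp
    conv_rhs => rw [List.drop_eq_getElem_cons (show i < (List.map (framingPad cl) rs).length by simpa using h)]
    simp
  | case2 i rs h =>
    rw [List.take_of_length_le (by omega), List.drop_of_length_le (by omega)]
    simp

-- ---- A's max loop ----
lemma maxA_mono (rs : List (List Char)) : ∀ (m : Nat),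
    m ≤ List.foldl (fun m row => if row.length > m then row.length else m) m rs := by
  induction rs with
  | nil => simp
  | cons y u ihu =>
    intro m
    simp only [List.foldl_cons]
    split
    · exact le_trans (le_of_lt (by assumption)) (ihu _)
    · exact ihu m

lemma le_maxA (rs : List (List Char)) (m : Nat) :
    ∀ r ∈ rs, r.length ≤ List.foldl (fun m row => if row.length > m then row.length else m) m rs := by
  induction rs generalizing m with
  | nil => simp
  | cons x t ih =>
    intro r hr
    rcases List.mem_cons.mp hr with h | h
    · subst h
      simp only [List.foldl_cons]
      refine le_trans ?_ (maxA_mono t _)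
      split <;> omega
    · exact ih _ r h

-- ---- A's global .replace turns the joined rows into sep'-joined rows ----
lemma go_skip (new : List Char) (r rest acc : List Char) (hr : '\n' ∉ r) :
    PySem.Chars.replace.go ['\n'] new (r ++ rest).length (r ++ rest) acc
      = PySem.Chars.replace.go ['\n'] new rest.length rest (r.reverse ++ acc) := by
  induction r generalizing acc with
  | nil => simp
  | cons c t ih =>
    have hc : c ≠ '\n' := by intro h; exact hr (h ▸ List.mem_cons_self)
    rw [List.cons_append, List.length_cons, PySem.Chars.replace.go]
    simp only [List.isPrefixOf]
    rw [if_neg (by simp [hc.symm] )]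
    simpa using ih (fun h => hr (List.mem_cons_of_mem _ h)) (acc := c :: acc)

lemma go_nl (new : List Char) (rest acc : List Char) :
    PySem.Chars.replace.go ['\n'] new ('\n' :: rest).length ('\n' :: rest) acc
      = PySem.Chars.replace.go ['\n'] new rest.length rest (new.reverse ++ acc) := by
  rw [List.length_cons, PySem.Chars.replace.go]
  simp [List.isPrefixOf]

lemma go_done (new acc : List Char) :
    PySem.Chars.replace.go ['\n'] new 0 [] acc = acc.reverse := by
  rw [PySem.Chars.replace.go]; simp

lemma replace_join (new : List Char) (rs : List (List Char))
    (h : ∀ r ∈ rs, '\n' ∉ r) :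
    PySem.Chars.replace (PySem.Chars.join ['\n'] rs) ['\n'] new
      = PySem.Chars.join new rs := by
  have main : ∀ (rs : List (List Char)) (acc : List Char), (∀ r ∈ rs, '\n' ∉ r) →
      PySem.Chars.replace.go ['\n'] new (PySem.Chars.join ['\n'] rs).length
        (PySem.Chars.join ['\n'] rs) acc = acc.reverse ++ PySem.Chars.join new rs := by
    intro rs
    induction rs with
    | nil => intro acc h; simp [PySem.Chars.join_nil, go_done]
    | cons r tl ih =>
      intro acc h
      cases tl with
      | nil =>
        rw [PySem.Chars.join_singleton, PySem.Chars.join_singleton]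
        have := go_skip new r [] (acc := acc) (h r List.mem_cons_self)
        simpa [go_done] using this
      | cons r2 t =>
        rw [PySem.Chars.join_cons_cons, PySem.Chars.join_cons_cons]
        have h1 : '\n' ∉ r := h r List.mem_cons_self
        have h2 : ∀ x ∈ r2 :: t, '\n' ∉ x := fun x hx => h x (List.mem_cons_of_mem _ hx)
        rw [List.append_assoc, go_skip new r _ acc h1]
        have : ['\n'] ++ PySem.Chars.join ['\n'] (r2 :: t) = '\n' :: PySem.Chars.join ['\n'] (r2 :: t) := rfl
        rw [this, go_nl, ih _ h2]
        simp
  rw [PySem.Chars.replace]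
  simp only [List.isEmpty]
  exact main rs [] h

-- ---- B's pass 1 over a join of '\n'-free rows ----
lemma foldl_stepM_row (r : List Char) (hr : '\n' ∉ r) (m k : Nat) :
    r.foldl (fun (st : Nat × Nat) ch =>
        if ch = '\n' then (if st.2 > st.1 then st.2 else st.1, 0) else (st.1, st.2 + 1)) (m, k)
      = (m, k + r.length) := by
  induction r generalizing k with
  | nil => simp
  | cons c t ih =>
    have hc : c ≠ '\n' := fun h => hr (h ▸ List.mem_cons_self)
    simp only [List.foldl_cons, if_neg hc]
    rw [ih (fun h => hr (List.mem_cons_of_mem _ h))]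
    simp [List.length_cons]; omega

lemma foldl_stepM_join (rows : List (List Char)) (hne : rows ≠ [])
    (hnl : ∀ r ∈ rows, '\n' ∉ r) (m : Nat) :
    (PySem.Chars.join ['\n'] rows).foldl (fun (st : Nat × Nat) ch =>
        if ch = '\n' then (if st.2 > st.1 then st.2 else st.1, 0) else (st.1, st.2 + 1)) (m, 0)
      = (rows.dropLast.foldl (fun m row => if row.length > m then row.length else m) m,
         (rows.getLast hne).length) := by
  induction rows generalizing m with
  | nil => exact absurd rfl hne
  | cons r t ih =>
    cases t with
    | nil =>
      rw [PySem.Chars.join_singleton, foldl_stepM_row r (hnl r List.mem_cons_self)]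
      simp
    | cons r2 u =>
      rw [PySem.Chars.join_cons_cons, List.append_assoc, List.foldl_append,
        foldl_stepM_row r (hnl r List.mem_cons_self)]
      simp only [List.cons_append, List.nil_append, List.foldl_cons, if_true]
      have := ih (by simp) (fun x hx => hnl x (List.mem_cons_of_mem _ hx))
        (if 0 + r.length > m then 0 + r.length else m)
      rw [this]
      have hd : (r :: r2 :: u).dropLast = r :: (r2 :: u).dropLast := by simp
      rw [hd, List.foldl_cons]
      simp [List.getLast_cons]

-- ---- B's pass 2 over a join of '\n'-free rows ----
lemma foldl_stepO_row (M : Nat) (r : List Char) (hr : '\n' ∉ r) (out : List Char) (k : Nat) :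
    r.foldl (fun (st : List Char × Nat) ch =>
        if ch = '\n' then (st.1 ++ (List.replicate (M - st.2) ' ' ++ " ║\n║ ".toList), 0)
        else (st.1 ++ [ch], st.2 + 1)) (out, k)
      = (out ++ r, k + r.length) := by
  induction r generalizing out k with
  | nil => simp
  | cons c t ih =>
    have hc : c ≠ '\n' := fun h => hr (h ▸ List.mem_cons_self)
    simp only [List.foldl_cons, if_neg hc]
    rw [ih (fun h => hr (List.mem_cons_of_mem _ h))]
    simp; omega

lemma foldl_stepO_join (M : Nat) (rows : List (List Char)) (hne : rows ≠ [])
    (hnl : ∀ r ∈ rows, '\n' ∉ r) (out : List Char) :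
    (fun q : List Char × Nat => q.1 ++ List.replicate (M - q.2) ' ')
      ((PySem.Chars.join ['\n'] rows).foldl (fun (st : List Char × Nat) ch =>
        if ch = '\n' then (st.1 ++ (List.replicate (M - st.2) ' ' ++ " ║\n║ ".toList), 0)
        else (st.1 ++ [ch], st.2 + 1)) (out, 0))
      = out ++ PySem.Chars.join " ║\n║ ".toList
          (rows.map (fun r => r ++ List.replicate (M - r.length) ' ')) := by
  induction rows generalizing out with
  | nil => exact absurd rfl hne
  | cons r t ih =>
    cases t with
    | nil =>
      rw [PySem.Chars.join_singleton, foldl_stepO_row M r (hnl r List.mem_cons_self)]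
      simp [PySem.Chars.join_singleton]
    | cons r2 u =>
      rw [PySem.Chars.join_cons_cons, List.append_assoc, List.foldl_append,
        foldl_stepO_row M r (hnl r List.mem_cons_self)]
      simp only [List.cons_append, List.nil_append, List.foldl_cons, if_true]
      have := ih (by simp) (fun x hx => hnl x (List.mem_cons_of_mem _ hx))
        (out ++ r ++ (List.replicate (M - (0 + r.length)) ' ' ++ " ║\n║ ".toList))
      simp only at this
      rw [this]
      simp only [List.map_cons, PySem.Chars.join_cons_cons]
      simp [List.append_assoc]

-- ---- main equivalence ----
theorem framing_eq_alt (ft : String) : framing ft = framing_alt ft := by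
  simp only [framing, framing_alt]
  set cs := ft.toList with hcs
  set rows := PySem.Chars.splitOn cs ['\n'] with hrows
  set M := rows.foldl (fun m row => if row.length > m then row.length else m) 0 with hM
  have hnl : ∀ r ∈ rows, '\n' ∉ r := splitOn_no_nl cs
  have hne : rows ≠ [] := splitOn_ne_nil cs
  have hjoin : PySem.Chars.join ['\n'] rows = cs := join_splitOn cs
  -- B's first pass computes A's max
  have hp1 : cs.foldl (fun (st : Nat × Nat) ch =>
      if ch = '\n' then (if st.2 > st.1 then st.2 else st.1, 0) else (st.1, st.2 + 1)) (0, 0)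
      = (rows.dropLast.foldl (fun m row => if row.length > m then row.length else m) 0,
         (rows.getLast hne).length) := by
    rw [← hjoin]; exact foldl_stepM_join rows hne hnl 0
  have hMsplit : M = (if (rows.getLast hne).length >
      rows.dropLast.foldl (fun m row => if row.length > m then row.length else m) 0
      then (rows.getLast hne).length
      else rows.dropLast.foldl (fun m row => if row.length > m then row.length else m) 0) := by
    conv_lhs => rw [hM, ← List.dropLast_append_getLast hne]
    rw [List.foldl_append]
    simp
  rw [hp1]
  rw [← hMsplit]
  -- A's padding loop pads every row to length M
  have hlen : ∀ r ∈ rows, r.length ≤ M := fun r hr => le_maxA rows 0 r hr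
  have hpad : framingPadLoop (List.replicate (M + 2) '=').length 0 rows
      = rows.map (fun r => r ++ List.replicate (M - r.length) ' ') := by
    rw [framingPadLoop_spec]
    simp only [List.take_zero, List.drop_zero, List.nil_append]
    refine List.map_congr_left ?_
    intro r hr
    have := hlen r hr
    rw [framingPad]
    rw [List.length_replicate, if_pos (by omega)]
    congr 2
    omega
  rw [hpad]
  set rowsP := rows.map (fun r => r ++ List.replicate (M - r.length) ' ') with hrowsP
  have hnlP : ∀ r ∈ rowsP, '\n' ∉ r := by
    intro r hr
    rcases List.mem_map.mp hr with ⟨x, hx, rfl⟩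
    intro hmem
    rcases List.mem_append.mp hmem with h | h
    · exact hnl x hx h
    · have := List.eq_of_mem_replicate h; simp at this
  rw [replace_join _ rowsP hnlP]
  -- B's second pass builds the bordered body over the same rows
  have hp2 := foldl_stepO_join M rows hne hnl
    ("╔".toList ++ List.replicate (M + 2) '=' ++ "╗\n║ ".toList)
  rw [hjoin] at hp2
  -- rewrite B's q-expression using hp2
  set q := cs.foldl (fun (st : List Char × Nat) ch =>
      if ch = '\n' then (st.1 ++ (List.replicate (M - st.2) ' ' ++ " ║\n║ ".toList), 0)
      else (st.1 ++ [ch], st.2 + 1))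
      ("╔".toList ++ List.replicate (M + 2) '=' ++ "╗\n║ ".toList, 0) with hq
  have hbody : q.1 ++ List.replicate (M - q.2) ' '
      = "╔".toList ++ List.replicate (M + 2) '=' ++ "╗\n║ ".toList
        ++ PySem.Chars.join " ║\n║ ".toList rowsP := by
    have := hp2
    simp only at this
    rw [hq, this]
  have hsep : (" ║".toList ++ ['\n'] ++ "║ ".toList : List Char) = " ║\n║ ".toList := by decide
  rw [hsep]
  congr 1
  have h1 : ("╗\n║ ".toList : List Char) = "╗".toList ++ ['\n'] ++ "║ ".toList := by decide
  have h2 : (" ║\n╚".toList : List Char) = " ║".toList ++ ['\n'] ++ "╚".toList := by decide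
  have hassoc : q.1 ++ (List.replicate (M - q.2) ' ' ++ " ║\n╚".toList
        ++ List.replicate (M + 2) '=' ++ "╝".toList)
      = (q.1 ++ List.replicate (M - q.2) ' ')
        ++ (" ║\n╚".toList ++ List.replicate (M + 2) '=' ++ "╝".toList) := by
    simp [List.append_assoc]
  rw [hassoc, hbody, h1, h2]
  simp [List.append_assoc]

-- ===== VERDICT (by name: the statement is the Claim_ definition above) =====
theorem framing_spec : Claim_equal_framing := by
  intro framed_text _
  unfold Spec_framing
  exact framing_eq_alt framed_text
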